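-- pv_equiv track=rewrite | github.com/tnakaicode/jburkardt-python | subset_sum/subset_sum.py | subset_next
-- ===== SOURCE A (Python) =====
-- def subset_next ( n, t, rank ):
--
-- #*****************************************************************************80
-- #
-- ## SUBSET_NEXT computes the subset lexicographic successor.
-- #
-- #  Discussion:
-- #
-- #    This is a lightly modified version of "subset_lex_successor()" from COMBO.
-- #
-- #  Example:
-- #
-- #    On initial call, N is 5 and the input value of RANK is -1.
-- #    Then here are the successive outputs from the program:
-- #
-- #   Rank   T1   T2   T3   T4   T5
-- #   ----   --   --   --   --   --
-- #      0    0    0    0    0    0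
-- #      1    0    0    0    0    1
-- #      2    0    0    0    1    0
-- #      3    0    0    0    1    1
-- #     ..   ..   ..   ..   ..   ..
-- #     30    1    1    1    1    0
-- #     31    1    1    1    1    1
-- #     -1    0    0    0    0    0  <-- Reached end of cycle.
-- #
-- #  Licensing:
-- #
-- #    I don't care what you do with this code.
-- #
-- #  Modified:
-- #
-- #    09 November 2015
-- #
-- #  Author:
-- #
-- #    John Burkardt
-- #
-- #  Reference:
-- #
-- #    Donald Kreher, Douglas Simpson,
-- #    Combinatorial Algorithms,
-- #    CRC Press, 1998,
-- #    ISBN: 0-8493-3988-X,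
-- #    LC: QA164.K73.
-- #
-- #  Parameters:
-- #
-- #    Input, integer N, the number of elements in the master set.
-- #    N must be positive.
-- #
-- #    Input/output, bool T(N), describes a subset.  T(I) is False if
-- #    the I-th element of the master set is not in the subset, and is
-- #    True if the I-th element is part of the subset.
-- #    On input, T describes a subset.
-- #    On output, T describes the next subset in the ordering.
-- #
-- #    Input/output, integer RANK, the rank.
-- #    If RANK = -1 on input, then the routine understands that this is
-- #    the first call, and that the user wishes the routine to supply
-- #    the first element in the ordering, which has RANK = 0.
-- #    In general, the input value of RANK is increased by 1 for output,
-- #    unless the very last element of the ordering was input, in which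
-- #    case the output value of RANK is -1.
-- #
--
-- #
-- #  Return the first element.
-- #
--   if ( rank == -1 ):
--     rank = 0
--     return t, rank
--
--   for i in range ( n - 1, -1, -1 ):
--
--     if ( not t[i] ):
--       t[i] = True;
--       rank = rank + 1;
--       return t, rank
--
--     t[i] = False
--
--   rank = -1
--
--   return t, rank
-- ===== SOURCE B (Python) =====
-- def subset_next(n, t, rank):
--     # First call: return t unchanged with rank 0.
--     if rank == -1:
--         return t, 0
--     m = max(n, 0)
--     v = 0
--     for i in range(m):
--         v = 2 * v + (1 if t[i] else 0)
--     w = v + 1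
--     if w == 1 << m:
--         t[:m] = [False] * m
--         return t, -1
--     for i in range(m):
--         t[i] = bool((w >> (m - 1 - i)) & 1)
--     return t, rank + 1
-- ===== Notes on version B (the rewrite author's own statement) =====
-- stated objective: alternative
-- what changed: Replaces the right-to-left carry scan over the bit list with integer arithmetic: encode the first n bits as the integer v, add 1, and either reset to all-False (v+1 = 2^n) or decode the bits of v+1 back into the list.
import Mathlib
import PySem

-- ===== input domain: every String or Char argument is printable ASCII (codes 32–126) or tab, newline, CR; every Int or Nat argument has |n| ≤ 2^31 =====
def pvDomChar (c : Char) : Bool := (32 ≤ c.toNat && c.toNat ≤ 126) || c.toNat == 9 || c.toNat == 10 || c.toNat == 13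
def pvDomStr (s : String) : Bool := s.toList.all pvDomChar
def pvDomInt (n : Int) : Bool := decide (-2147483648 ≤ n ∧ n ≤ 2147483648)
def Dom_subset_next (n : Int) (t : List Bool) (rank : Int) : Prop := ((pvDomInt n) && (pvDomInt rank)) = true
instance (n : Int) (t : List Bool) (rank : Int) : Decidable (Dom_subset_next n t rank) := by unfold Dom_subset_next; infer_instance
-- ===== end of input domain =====

-- B replaces A's right-to-left carry scan by integer arithmetic (encode the first n
-- bits as an integer, add 1, decode); equivalence is about the RETURN value — both
-- Pythons also mutate t in place, to the same final contents.

-- ===== PORT A =====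
-- the 'for i in range(n-1,-1,-1)' loop with its early returns
def subsetA_loop (rank : Int) : List Bool → List Int → List Bool × Int
  | t, [] => (t, -1)
  | t, i :: rest =>
    match PySem.List.pyGet? t i with
    | none => (t, 0)  -- Python raises IndexError here; excluded by Pre_
    | some b =>
      if b = false then (t.set i.toNat true, rank + 1)
      else subsetA_loop rank (t.set i.toNat false) rest

def subset_next (n : Int) (t : List Bool) (rank : Int) : List Bool × Int :=
  if rank = -1 then (t, 0)
  else subsetA_loop rank t (PySem.List.pyRange (n - 1) (-1) (-1))

-- ===== PORT B =====
def subset_next_alt (n : Int) (t : List Bool) (rank : Int) : List Bool × Int :=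
  if rank = -1 then (t, 0)
  else
    let m : Int := max n 0
    let v : Int := (PySem.List.pyRange 0 m 1).foldl
      (fun v i => 2 * v + (if (PySem.List.pyGet? t i).getD false then 1 else 0)) 0
    let w : Int := v + 1
    if w = 2 ^ m.toNat then      -- Python: w == 1 << m
      -- t[:m] = [False]*m  (m ≤ len t under Pre_)
      (List.replicate m.toNat false ++ t.drop m.toNat, -1)
    else
      -- t[i] = bool((w >> (m-1-i)) & 1); w > 0, so '>>' and '& 1' are / and % 2 (exact here)
      ((PySem.List.pyRange 0 m 1).foldl
        (fun s i => s.set i.toNat (decide ((w / 2 ^ (m - 1 - i).toNat) % 2 = 1))) t,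
       rank + 1)

-- ===== PRECONDITION & SPEC =====
-- Pre_ excludes exactly the inputs where A raises IndexError (rank ≠ -1 and n > len(t)).
def Pre_subset_next (n : Int) (t : List Bool) (rank : Int) : Prop :=
  rank = -1 ∨ n ≤ (t.length : Int)
instance (n : Int) (t : List Bool) (rank : Int) : Decidable (Pre_subset_next n t rank) := by
  unfold Pre_subset_next; infer_instance
def pvWitness_subset_next : Int × List Bool × Int := (2, [false, true], 0)

def Spec_subset_next (n : Int) (t : List Bool) (rank : Int) (out : List Bool × Int) : Prop := out = subset_next_alt n t rank
instance (n : Int) (t : List Bool) (rank : Int) (out : List Bool × Int) : Decidable (Spec_subset_next n t rank out) := by unfold Spec_subset_next; infer_instance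

-- ===== CLAIM (what is proved, stated in full; the proofs are below) =====
def Claim_equal_subset_next : Prop := ∀ (n : Int) (t : List Bool) (rank : Int), Dom_subset_next n t rank → Pre_subset_next n t rank → Spec_subset_next n t rank (subset_next n t rank)

-- ===== LEMMAS AND PROOFS =====

def bitsVal (bs : List Bool) : Int := bs.foldl (fun v b => 2 * v + (if b then 1 else 0)) 0

def writeBits (t : List Bool) : Nat → Int → List Bool
  | 0, _ => t
  | m + 1, w => (writeBits t m (w / 2)).set m (decide (w % 2 = 1))

theorem bitsVal_snoc (bs : List Bool) (b : Bool) :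
    bitsVal (bs ++ [b]) = 2 * bitsVal bs + (if b then 1 else 0) := by
  simp [bitsVal, List.foldl_append]

theorem bitsVal_nonneg (bs : List Bool) : 0 ≤ bitsVal bs := by
  induction bs using List.reverseRecOn with
  | nil => simp [bitsVal]
  | append_singleton bs b ih => rw [bitsVal_snoc]; split <;> omega

theorem bitsVal_lt (bs : List Bool) : bitsVal bs < 2 ^ bs.length := by
  induction bs using List.reverseRecOn with
  | nil => simp [bitsVal]
  | append_singleton bs b ih =>
      rw [bitsVal_snoc]
      simp only [List.length_append, List.length_singleton, pow_succ]
      split <;> omega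

theorem writeBits_set_comm (t : List Bool) (m : Nat) (w : Int) (j : Nat) (hj : m ≤ j) (b : Bool) :
    writeBits (t.set j b) m w = (writeBits t m w).set j b := by
  induction m generalizing w with
  | zero => rfl
  | succ m ih =>
      simp only [writeBits]
      rw [ih (w/2) (by omega), List.set_comm _ _ (by omega : m ≠ j)]

theorem writeBits_self (t : List Bool) (m : Nat) (hm : m ≤ t.length) :
    writeBits t m (bitsVal (t.take m)) = t := by
  induction m with
  | zero => rfl
  | succ m ih =>
      have hlt : m < t.length := by omega
      rw [List.take_succ_eq_append_getElem hlt, bitsVal_snoc]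
      simp only [writeBits]
      have h2 : (2 * bitsVal (t.take m) + (if t[m] then 1 else 0)) / 2 = bitsVal (t.take m) := by
        split <;> omega
      have h3 : decide ((2 * bitsVal (t.take m) + (if t[m] then 1 else 0)) % 2 = 1) = t[m] := by
        cases h : t[m] <;> simp
      rw [h2, h3, ih (by omega), List.set_getElem_self hlt]

theorem A_char (m : Nat) (t : List Bool) (rank : Int) (hm : m ≤ t.length) :
    subsetA_loop rank t (PySem.List.pyRange ((m : Int) - 1) (-1) (-1)) =
      if bitsVal (t.take m) + 1 = 2 ^ m then (List.replicate m false ++ t.drop m, -1)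
      else (writeBits t m (bitsVal (t.take m) + 1), rank + 1) := by
  induction m generalizing t with
  | zero =>
      rw [PySem.List.pyRange_neg_one_eq_nil (by norm_num)]
      simp [subsetA_loop, bitsVal]
  | succ m ih =>
      have hlt : m < t.length := by omega
      have hnn : 0 ≤ bitsVal (t.take m) := bitsVal_nonneg _
      have hb : bitsVal (t.take m) < 2 ^ m := by
        have := bitsVal_lt (t.take m)
        simpa [List.length_take, Nat.min_eq_left (le_of_lt hlt)] using this
      have hp : (2:Int) ^ (m+1) = 2 ^ m * 2 := pow_succ 2 m
      have hcons : PySem.List.pyRange ((↑(m+1) : Int) - 1) (-1) (-1)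
          = (m : Int) :: PySem.List.pyRange ((m : Int) - 1) (-1) (-1) := by
        rw [show ((↑(m+1) : Int) - 1) = (m : Int) by push_cast; ring,
            PySem.List.pyRange_neg_one_cons (by omega)]
      rw [hcons]
      simp only [subsetA_loop]
      rw [PySem.List.pyGet?_eq_some_getElem t (by omega) (by exact_mod_cast hlt)]
      simp only [Int.toNat_natCast]
      cases h : t[m] with
      | false =>
          have hvs : bitsVal (t.take (m+1)) = 2 * bitsVal (t.take m) := by
            rw [List.take_succ_eq_append_getElem hlt, bitsVal_snoc, h]; simp
          rw [if_pos rfl, hvs, if_neg (by omega)]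
          simp only [writeBits]
          rw [show (2 * bitsVal (t.take m) + 1) / 2 = bitsVal (t.take m) by omega,
              show decide ((2 * bitsVal (t.take m) + 1) % 2 = 1) = true by
                rw [decide_eq_true_iff]; omega,
              writeBits_self t m (by omega)]
      | true =>
          have hvs : bitsVal (t.take (m+1)) = 2 * bitsVal (t.take m) + 1 := by
            rw [List.take_succ_eq_append_getElem hlt, bitsVal_snoc, h]; simp
          rw [if_neg (by simp), ih (t.set m false) (by simpa using le_of_lt hlt)]
          have htake : (t.set m false).take m = t.take m := by
            rw [List.take_set]
            exact List.set_eq_of_length_le (by simp [List.length_take])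
          rw [htake, hvs]
          by_cases hc : bitsVal (t.take m) + 1 = 2 ^ m
          · rw [if_pos hc, if_pos (by omega)]
            have hdrop : (t.set m false).drop m = false :: t.drop (m+1) := by
              rw [List.drop_eq_getElem_cons (by simpa using hlt)]
              congr 1
              · simp
              · rw [List.drop_set]; simp
            rw [hdrop, List.replicate_succ', List.append_assoc]
            rfl
          · rw [if_neg hc, if_neg (by omega)]
            simp only [writeBits]
            rw [show (2 * bitsVal (t.take m) + 1 + 1) / 2 = bitsVal (t.take m) + 1 by omega,
                show decide ((2 * bitsVal (t.take m) + 1 + 1) % 2 = 1) = false by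
                  rw [decide_eq_false_iff_not]; omega,
                writeBits_set_comm t m _ m le_rfl false]

theorem B_val (m : Nat) (t : List Bool) (hm : m ≤ t.length) :
    (PySem.List.pyRange 0 (m : Int) 1).foldl
      (fun v i => 2 * v + (if (PySem.List.pyGet? t i).getD false then 1 else 0)) 0
      = bitsVal (t.take m) := by
  induction m with
  | zero => simp [bitsVal]
  | succ m ih =>
      have hlt : m < t.length := by omega
      rw [show ((↑(m+1) : Int)) = (m : Int) + 1 by push_cast; ring,
          PySem.List.pyRange_one_succ_right (by omega), List.foldl_append,
          ih (by omega), List.take_succ_eq_append_getElem hlt, bitsVal_snoc]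
      simp only [List.foldl_cons, List.foldl_nil]
      rw [PySem.List.pyGet?_eq_some_getElem t (by omega) (by exact_mod_cast hlt)]
      simp

theorem B_write (m : Nat) (t : List Bool) (w : Int) (hw : 0 ≤ w) :
    (PySem.List.pyRange 0 (m : Int) 1).foldl
      (fun s i => s.set i.toNat (decide ((w / 2 ^ (((m : Int)) - 1 - i).toNat) % 2 = 1))) t
      = writeBits t m w := by
  induction m generalizing w with
  | zero => simp [writeBits]
  | succ m ih =>
      rw [show ((↑(m+1) : Int)) = (m : Int) + 1 by push_cast; ring,
          PySem.List.pyRange_one_succ_right (by omega), List.foldl_append]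
      have hcongr : (PySem.List.pyRange 0 (m : Int) 1).foldl
          (fun s i => s.set i.toNat (decide ((w / 2 ^ (((m : Int)) + 1 - 1 - i).toNat) % 2 = 1))) t
        = (PySem.List.pyRange 0 (m : Int) 1).foldl
          (fun s i => s.set i.toNat (decide (((w / 2) / 2 ^ (((m : Int)) - 1 - i).toNat) % 2 = 1))) t := by
        apply PySem.List.foldl_congr_mem
        intro s i hi
        have hmem := (PySem.List.mem_pyRange_one).1 hi
        have hexp : (((m : Int)) + 1 - 1 - i).toNat = (((m : Int)) - 1 - i).toNat + 1 := by omega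
        rw [hexp, pow_succ, mul_comm, ← Int.ediv_ediv_of_nonneg (by norm_num : (0:Int) ≤ 2)]
      rw [hcongr, ih (w/2) (Int.ediv_nonneg hw (by norm_num))]
      simp only [List.foldl_cons, List.foldl_nil, writeBits]
      rw [show (((m:Int)) + 1 - 1 - (m:Int)).toNat = 0 by omega]
      simp [Int.toNat_natCast]
theorem subset_next_main (n : Int) (t : List Bool) (rank : Int)
    (hpre : Pre_subset_next n t rank) :
    subset_next n t rank = subset_next_alt n t rank := by
  unfold Pre_subset_next at hpre
  unfold subset_next subset_next_alt
  by_cases hr : rank = -1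
  · simp [hr]
  · simp only [if_neg hr]
    have hpre' : n ≤ (t.length : Int) := hpre.resolve_left hr
    have hmax : max n 0 = ((n.toNat : Nat) : Int) := by omega
    have hml : n.toNat ≤ t.length := by omega
    have hrange : PySem.List.pyRange (n-1) (-1) (-1)
        = PySem.List.pyRange ((n.toNat : Int) - 1) (-1) (-1) := by
      rcases (by omega : 0 ≤ n ∨ n < 0) with h|h
      · rw [show ((n.toNat : Int)) = n by omega]
      · rw [PySem.List.pyRange_neg_one_eq_nil (by omega),
            PySem.List.pyRange_neg_one_eq_nil (by omega)]
    rw [hrange, A_char n.toNat t rank hml, hmax]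
    simp only [Int.toNat_natCast]
    rw [B_val n.toNat t hml, B_write n.toNat t _ (by have := bitsVal_nonneg (t.take n.toNat); omega)]

-- ===== VERDICT (by name: the statement is the Claim_ definition above) =====
theorem subset_next_spec : Claim_equal_subset_next := by
  intro n t rank _ hpre
  unfold Spec_subset_next
  exact subset_next_main n t rank hpre
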